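-- pv_equiv track=rewrite | github.com/chrisRduckworth/Advent-of-Code-2025 | day_04.py | part_2
-- ===== SOURCE A (Python) =====
-- def part_2(input):
--     # same as part 1, except we keep track of which rolls to remove
--     # and continue doing it until there are no more to remove
--     padded_input = ["." + line + "." for line in input]
--     padded_input.insert(0, "." * len(padded_input[0]))
--     padded_input.append("." * len(padded_input[0]))
--     padded_input = [list(l) for l in padded_input]
--
--     valid = 0
--     to_change = [None]
--
--     while len(to_change) > 0:
--         to_change = []
--         for y in range(1, len(padded_input)-1):
--             line = padded_input[y]
--             for x in range(1, len(line)-1):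
--                 char = line[x]
--                 if char == "@":
--                     adjacent_rolls = 0
--                     for d_x in range(-1, 2):
--                         for d_y in range(-1,2):
--                             if padded_input[y + d_y][x + d_x] == "@":
--                                 adjacent_rolls += 1
--                     adjacent_rolls -= 1
--
--                     if adjacent_rolls < 4:
--                         to_change.append((y, x))
--
--         valid += len(to_change)
--         for y, x in to_change:
--             padded_input[y][x] = "."
--
--     return valid
-- ===== SOURCE B (Python) =====
-- OFFS = [(-1, -1), (-1, 0), (-1, 1), (0, -1), (0, 1), (1, -1), (1, 0), (1, 1)]
--
--
-- def part_2(input):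
--     # worklist peeling: after a cell is removed, only its neighbours can newly
--     # drop below 4 live neighbours, so only they are re-examined (O(#cells) total
--     # work instead of a full grid rescan per round; the stable set reached is the
--     # order-independent 4-core, so the removed count equals A's).
--     cells = {(y, x) for y, row in enumerate(input) for x, ch in enumerate(row) if ch == "@"}
--     live = set(cells)
--     queue = list(cells)
--     while queue:
--         c = queue.pop()
--         if c not in live:
--             continue
--         y, x = c
--         if sum((y + dy, x + dx) in live for dy, dx in OFFS) < 4:
--             live.remove(c)
--             queue.extend(n for dy, dx in OFFS if (n := (y + dy, x + dx)) in live)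
--     return len(cells) - len(live)
-- ===== Notes on version B (the rewrite author's own statement) =====
-- stated objective: faster
-- what changed: Replaces A's repeated full-grid rescan per round by worklist peeling: '@' coordinates go on a queue once, and after a cell is removed only its neighbours are re-enqueued and re-checked, so total work is O(#cells) instead of O(rounds * W*H); the stable set reached is the order-independent 4-core, proved equal to A's fixpoint.
-- outside the precondition, e.g. on part_2([]): A raises IndexError, B returns 0; on part_2(['@@@@@', '@']): A raises IndexError, B returns 6
import Mathlib
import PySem

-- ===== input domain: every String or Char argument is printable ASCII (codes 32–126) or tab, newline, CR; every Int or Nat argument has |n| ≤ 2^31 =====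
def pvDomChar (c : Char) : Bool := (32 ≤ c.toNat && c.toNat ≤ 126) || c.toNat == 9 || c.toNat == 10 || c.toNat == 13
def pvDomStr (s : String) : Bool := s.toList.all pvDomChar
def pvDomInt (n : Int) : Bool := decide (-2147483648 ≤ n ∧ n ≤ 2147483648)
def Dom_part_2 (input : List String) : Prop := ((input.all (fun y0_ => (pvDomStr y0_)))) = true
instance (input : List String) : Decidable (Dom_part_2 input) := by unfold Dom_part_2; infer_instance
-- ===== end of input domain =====

-- B replaces A's repeated full-grid rescan by worklist peeling: cells go on a queue, and
-- after a removal only the removed cell's neighbours are re-examined; the stable set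
-- reached (the 4-core) is order-independent, so the removed count equals A's
-- (objective: faster, O(#cells) total work instead of O(rounds · W·H)).

-- ===== PORT A =====
def pvGetRow (g : List (List Char)) (y : Int) : List Char := PySem.List.pyGetD g y []

def pvGetCh (g : List (List Char)) (y x : Int) : Char := PySem.List.pyGetD (pvGetRow g y) x '.'

def pvAdj (g : List (List Char)) (y x : Int) : Int :=
  (PySem.List.pyRange (-1) 2 1).foldl (fun n dx =>
    (PySem.List.pyRange (-1) 2 1).foldl (fun n dy =>
      if pvGetCh g (y + dy) (x + dx) = '@' then n + 1 else n) n) 0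

def pvScan (g : List (List Char)) : List (Int × Int) :=
  (PySem.List.pyRange 1 ((g.length : Int) - 1) 1).foldl (fun acc y =>
    (PySem.List.pyRange 1 (((pvGetRow g y).length : Int) - 1) 1).foldl (fun acc2 x =>
      if pvGetCh g y x = '@' then
        (if pvAdj g y x - 1 < 4 then acc2 ++ [(y, x)] else acc2)
      else acc2) acc) []

def pvApply (g : List (List Char)) (tc : List (Int × Int)) : List (List Char) :=
  tc.foldl (fun h c => PySem.List.pySetD h c.1 (PySem.List.pySetD (pvGetRow h c.1) c.2 '.')) g

def pvLoopA : Nat → List (List Char) → Int → Int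
  | 0, _, valid => valid
  | fuel + 1, g, valid =>
      let tc := pvScan g
      if tc = [] then valid
      else pvLoopA fuel (pvApply g tc) (valid + tc.length)

def part_2 (input : List String) : Int :=
  let padded : List (List Char) := input.map (fun l => '.' :: l.toList ++ ['.'])
  let w := (padded.headD []).length
  let g := List.replicate w '.' :: padded ++ [List.replicate w '.']
  pvLoopA (g.foldl (fun n r => n + r.length) 0 + 1) g 0

-- ===== PORT B =====
def pvOffs : List (Int × Int) := [(-1,-1),(-1,0),(-1,1),(0,-1),(0,1),(1,-1),(1,0),(1,1)]

-- sum((y+dy, x+dx) in live for dy, dx in OFFS)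
def pvDeg (live : List (Int × Int)) (c : Int × Int) : Int :=
  (pvOffs.map (fun d => if (c.1 + d.1, c.2 + d.2) ∈ live then (1 : Int) else 0)).sum

-- the generator in queue.extend: neighbours of c that are in live, in OFFS order
def pvNbrsIn (live : List (Int × Int)) (c : Int × Int) : List (Int × Int) :=
  pvOffs.filterMap (fun d =>
    if (c.1 + d.1, c.2 + d.2) ∈ live then some (c.1 + d.1, c.2 + d.2) else none)

-- Python's while loop; the Python queue list is stored reversed, so queue.pop() is the
-- head and queue.extend(ns) prepends ns.reverse.  live.remove(c) is Set.discard (equal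
-- here since the guard ensures c ∈ live).  The fuel only makes the recursion structural:
-- 9*|live| + |queue| strictly decreases each iteration, so the initial fuel below never
-- runs out before the queue empties.
def pvPeel : Nat → PySem.Set (Int × Int) → List (Int × Int) → PySem.Set (Int × Int)
  | 0, live, _ => live
  | _ + 1, live, [] => live
  | fuel + 1, live, c :: queue =>
      if c ∈ live then
        if pvDeg live c < 4 then
          pvPeel fuel (PySem.Set.discard live c)
            ((pvNbrsIn (PySem.Set.discard live c) c).reverse ++ queue)
        else pvPeel fuel live queue
      else pvPeel fuel live queue

def pvCells0 (input : List String) : PySem.Set (Int × Int) :=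
  PySem.Set.ofList ((PySem.List.enumerate input).flatMap (fun p =>
    (PySem.List.enumerate p.2.toList).filterMap (fun q =>
      if q.2 = '@' then some (p.1, q.1) else none)))

def part_2_alt (input : List String) : Int :=
  let cells := pvCells0 input
  let live := pvPeel (10 * cells.length + 1) cells cells.reverse
  (cells.length : Int) - (live.length : Int)

-- ===== PRECONDITION & SPEC =====
-- Pre_part_2 excludes exactly the inputs on which the Python A raises IndexError: the empty
-- list, and ragged inputs where some '@' has an adjacent (or virtual border) row too short
-- for the 8-neighbour reads.  B returns a value on every input.
def pvEll (input : List String) (r : Int) : Int :=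
  if r < 0 ∨ (input.length : Int) ≤ r then PySem.Str.len (input.headD "")
  else PySem.Str.len (PySem.List.pyGetD input r "")

def Pre_part_2 (input : List String) : Prop :=
  input ≠ [] ∧ ∀ p ∈ PySem.List.enumerate input, ∀ q ∈ PySem.List.enumerate p.2.toList,
    q.2 = '@' → q.1 + 1 ≤ pvEll input (p.1 - 1) ∧ q.1 + 1 ≤ pvEll input (p.1 + 1)

instance (input : List String) : Decidable (Pre_part_2 input) := by
  unfold Pre_part_2; infer_instance

def pvWitness_part_2 : List String := ["@.@", ".@.", "@.@"]

def Spec_part_2 (input : List String) (out : Int) : Prop := out = part_2_alt input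
instance (input : List String) (out : Int) : Decidable (Spec_part_2 input out) := by unfold Spec_part_2; infer_instance

-- ===== CLAIM (what is proved, stated in full; the proofs are below) =====
def Claim_equal_part_2 : Prop := ∀ (input : List String), Dom_part_2 input → Pre_part_2 input → Spec_part_2 input (part_2 input)

-- ===== LEMMAS AND PROOFS =====

-- A's simultaneous refilter, used only by the proofs as a stepping stone between the two
-- ports: A's grid loop is first shown equal to this coordinate-set fixpoint, which is then
-- shown to compute the same 4-core as B's peeling.
def pvKept (cells : List (Int × Int)) : List (Int × Int) :=
  cells.filter (fun c => decide (4 ≤ pvDeg cells c))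

def pvLoopB (total : Int) (cells : List (Int × Int)) : Int :=
  if (pvKept cells).length = cells.length then total - cells.length
  else pvLoopB total (pvKept cells)
termination_by cells.length
decreasing_by
  have h2 : (pvKept cells).length ≤ cells.length := List.length_filter_le _ cells
  omega

-- the '@' positions of the padded grid that A's per-round scan can see, in scan order
def pvPos (g : List (List Char)) : List (Int × Int) :=
  (PySem.List.pyRange 1 ((g.length : Int) - 1) 1).flatMap (fun y =>
    (PySem.List.pyRange 1 (((pvGetRow g y).length : Int) - 1) 1).filterMap (fun x =>
      if pvGetCh g y x = '@' then some (y, x) else none))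

def pvShift (c : Int × Int) : Int × Int := (c.1 + 1, c.2 + 1)

-- every '@' of the grid (at nonnegative coordinates) is strictly interior
def pvBorderOK (g : List (List Char)) : Prop :=
  ∀ y x : Int, 0 ≤ y → 0 ≤ x → pvGetCh g y x = '@' →
    1 ≤ y ∧ y + 1 < (g.length : Int) ∧ 1 ≤ x ∧ x + 1 < ((pvGetRow g y).length : Int)

theorem mem_pvPos {g : List (List Char)} {y x : Int} :
    (y, x) ∈ pvPos g ↔ 1 ≤ y ∧ y < (g.length : Int) - 1 ∧ 1 ≤ x ∧
      x < ((pvGetRow g y).length : Int) - 1 ∧ pvGetCh g y x = '@' := by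
  simp only [pvPos, List.mem_flatMap, List.mem_filterMap, PySem.List.mem_pyRange_one]
  constructor
  · rintro ⟨a, ⟨ha1, ha2⟩, b, ⟨hb1, hb2⟩, h⟩
    split at h
    · rcases h with ⟨rfl, rfl⟩; simp_all
    · simp_all
  · rintro ⟨h1, h2, h3, h4, h5⟩
    exact ⟨y, ⟨h1, by omega⟩, ⟨x, ⟨h3, by omega⟩, by simp [h5]⟩⟩
theorem pvFMF {α β : Type} (l : List α) (P : α → Prop) [DecidablePred P] (R : β → Bool) (f : α → β) :
    (l.filterMap (fun x => if P x then some (f x) else none)).filter R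
    = (l.filter (fun x => decide (P x) && R (f x))).map f := by
  induction l with
  | nil => rfl
  | cons a t ih =>
    by_cases h : P a
    · by_cases h2 : R (f a) = true <;> simp [h, h2, ih]
    · simp [h, ih]

theorem pvScan_eq (g : List (List Char)) :
    pvScan g = (pvPos g).filter (fun c => decide (pvAdj g c.1 c.2 - 1 < 4)) := by
  unfold pvScan pvPos
  rw [List.filter_flatMap]
  rw [show (fun acc y =>
      (PySem.List.pyRange 1 (((pvGetRow g y).length : Int) - 1) 1).foldl (fun acc2 x =>
        if pvGetCh g y x = '@' then
          (if pvAdj g y x - 1 < 4 then acc2 ++ [(y, x)] else acc2)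
        else acc2) acc)
    = (fun acc y => acc ++ ((PySem.List.pyRange 1 (((pvGetRow g y).length : Int) - 1) 1).filter
        (fun x => decide (pvGetCh g y x = '@') && decide (pvAdj g y x - 1 < 4))).map (fun x => (y, x)))
    from funext fun acc => funext fun y => ?_]
  · rw [PySem.List.foldl_append_eq_flatMap]
    simp only [List.nil_append]
    congr 1
    funext y
    rw [pvFMF]
  · rw [← PySem.List.foldl_append_if]
    apply PySem.List.foldl_congr_mem
    intro acc2 x _
    by_cases h1 : pvGetCh g y x = '@' <;> by_cases h2 : pvAdj g y x - 1 < 4 <;> simp [h1, h2]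
theorem cells_nonneg {g : List (List Char)} {cells : List (Int × Int)}
    (hinv : cells.map pvShift = pvPos g) {c : Int × Int} (hc : c ∈ cells) :
    0 ≤ c.1 ∧ 0 ≤ c.2 := by
  have h1 : pvShift c ∈ pvPos g := by
    rw [← hinv]; exact List.mem_map_of_mem hc
  have h2 := mem_pvPos (g := g) (y := c.1 + 1) (x := c.2 + 1) |>.1 h1
  exact ⟨by omega, by omega⟩

theorem mem_cells_iff {g : List (List Char)} {cells : List (Int × Int)}
    (hinv : cells.map pvShift = pvPos g) (hb : pvBorderOK g)
    (a b : Int) (ha : -1 ≤ a) (hb2 : -1 ≤ b) :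
    ((a, b) ∈ cells) ↔ pvGetCh g (a + 1) (b + 1) = '@' := by
  constructor
  · intro h
    have h1 : pvShift (a, b) ∈ pvPos g := by
      rw [← hinv]; exact List.mem_map_of_mem h
    exact (mem_pvPos.1 h1).2.2.2.2
  · intro h
    have hbo := hb (a + 1) (b + 1) (by omega) (by omega) h
    have h1 : (a + 1, b + 1) ∈ pvPos g := mem_pvPos.2 ⟨by omega, by omega, by omega, by omega, h⟩
    rw [← hinv] at h1
    obtain ⟨d, hd, he⟩ := List.mem_map.1 h1
    have : d = (a, b) := by
      simp only [pvShift, Prod.mk.injEq] at he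
      obtain ⟨e1, e2⟩ := he
      obtain ⟨x1, x2⟩ := d
      simp only [Prod.mk.injEq]
      constructor <;> omega
    rwa [this] at hd

set_option maxHeartbeats 2000000 in
theorem pvAdj_corr {g : List (List Char)} {cells : List (Int × Int)}
    (hinv : cells.map pvShift = pvPos g) (hb : pvBorderOK g)
    {c : Int × Int} (hc : c ∈ cells) :
    pvAdj g (c.1 + 1) (c.2 + 1) = pvDeg cells c + 1 := by
  obtain ⟨h01, h02⟩ := cells_nonneg hinv hc
  have hcc : pvGetCh g (c.1 + 1) (c.2 + 1) = '@' := by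
    have h' : (c.1, c.2) ∈ cells := by simpa using hc
    exact (mem_cells_iff hinv hb c.1 c.2 (by omega) (by omega)).1 h'
  have E : ∀ dy dx : Int, -1 ≤ dy → -1 ≤ dx →
      (((c.1 + dy, c.2 + dx) ∈ cells) ↔ pvGetCh g (c.1 + 1 + dy) (c.2 + 1 + dx) = '@') := by
    intro dy dx h1 h2
    have h3 := mem_cells_iff hinv hb (c.1 + dy) (c.2 + dx) (by omega) (by omega)
    have e1 : c.1 + dy + 1 = c.1 + 1 + dy := by ring
    have e2 : c.2 + dx + 1 = c.2 + 1 + dx := by ring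
    rwa [e1, e2] at h3
  have hr : PySem.List.pyRange (-1) 2 1 = [-1, 0, 1] := by decide
  unfold pvAdj pvDeg pvOffs
  rw [hr]
  simp only [PySem.List.foldl_ite_add_one]
  simp only [List.foldl_cons, List.foldl_nil, List.countP_cons, List.countP_nil,
    List.map_cons, List.map_nil, List.sum_cons, List.sum_nil, decide_eq_true_eq]
  push_cast
  simp only [E (-1) (-1) (by norm_num) (by norm_num), E (-1) 0 (by norm_num) (by norm_num),
    E (-1) 1 (by norm_num) (by norm_num), E 0 (-1) (by norm_num) (by norm_num),
    E 0 1 (by norm_num) (by norm_num), E 1 (-1) (by norm_num) (by norm_num),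
    E 1 0 (by norm_num) (by norm_num), E 1 1 (by norm_num) (by norm_num)]
  have e0a : c.1 + 1 + 0 = c.1 + 1 := by ring
  have e0b : c.2 + 1 + 0 = c.2 + 1 := by ring
  rw [e0a, e0b, if_pos hcc]
  split_ifs <;> omega
def pvStep (g : List (List Char)) (c : Int × Int) : List (List Char) :=
  PySem.List.pySetD g c.1 (PySem.List.pySetD (pvGetRow g c.1) c.2 '.')

theorem pvApply_cons (g : List (List Char)) (c : Int × Int) (tc : List (Int × Int)) :
    pvApply g (c :: tc) = pvApply (pvStep g c) tc := by
  simp [pvApply, pvStep, List.foldl_cons]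

theorem pvStep_eq_set {g : List (List Char)} {c : Int × Int}
    (h1 : 0 ≤ c.1) (h2 : 0 ≤ c.2) :
    pvStep g c = g.set c.1.toNat ((pvGetRow g c.1).set c.2.toNat '.') := by
  rw [pvStep, PySem.List.pySetD_of_nonneg _ _ h1, PySem.List.pySetD_of_nonneg _ _ h2]

theorem length_pvStep (g : List (List Char)) (c : Int × Int) :
    (pvStep g c).length = g.length := by
  simp [pvStep, PySem.List.length_pySetD]

theorem pvGetRow_nonneg {g : List (List Char)} {y : Int} (h : 0 ≤ y) :
    pvGetRow g y = g.getD y.toNat [] := by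
  conv_lhs => rw [pvGetRow, show y = ((y.toNat : Nat) : Int) from (Int.toNat_of_nonneg h).symm,
    PySem.List.pyGetD_natCast]

theorem rowlen_pvStep {g : List (List Char)} {c : Int × Int}
    (h1 : 0 ≤ c.1) (h2 : 0 ≤ c.2) {y : Int} (hy : 0 ≤ y) :
    (pvGetRow (pvStep g c) y).length = (pvGetRow g y).length := by
  rw [pvStep_eq_set h1 h2, pvGetRow_nonneg hy, pvGetRow_nonneg hy]
  by_cases h : y.toNat = c.1.toNat
  · rw [h]
    by_cases hlt : c.1.toNat < g.length
    · rw [List.getD_eq_getElem?_getD, List.getElem?_set_self (by omega)]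
      simp only [Option.getD_some, List.length_set]
      rw [List.getD_eq_getElem?_getD, List.getElem?_eq_getElem hlt]
      simp [pvGetRow_nonneg h1, List.getD_eq_getElem?_getD, List.getElem?_eq_getElem hlt]
    · rw [List.set_eq_of_length_le (by omega)]
  · rw [List.getD_eq_getElem?_getD, List.getElem?_set_ne (by omega), ← List.getD_eq_getElem?_getD]

theorem pyGetD_nonneg' {α : Type} (xs : List α) (d : α) {q : Int} (hq : 0 ≤ q) :
    PySem.List.pyGetD xs q d = xs.getD q.toNat d := by
  conv_lhs => rw [show q = ((q.toNat : Nat) : Int) from (Int.toNat_of_nonneg hq).symm,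
    PySem.List.pyGetD_natCast]

theorem getCh_pvStep {g : List (List Char)} {c : Int × Int}
    (h1 : 0 ≤ c.1) (h2 : 0 ≤ c.2) (hin : c.1 < (g.length : Int))
    (hin2 : c.2 < ((pvGetRow g c.1).length : Int))
    {p q : Int} (hp : 0 ≤ p) (hq : 0 ≤ q) :
    pvGetCh (pvStep g c) p q = if p = c.1 ∧ q = c.2 then '.' else pvGetCh g p q := by
  have hlt : c.1.toNat < g.length := by omega
  have hlt2 : c.2.toNat < (pvGetRow g c.1).length := by omega
  have hrow : pvGetRow (pvStep g c) p =
      if p = c.1 then (pvGetRow g c.1).set c.2.toNat '.' else pvGetRow g p := by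
    rw [pvGetRow_nonneg hp, pvStep_eq_set h1 h2]
    by_cases hpc : p = c.1
    · subst hpc
      rw [if_pos rfl, List.getD_eq_getElem?_getD, List.getElem?_set_self (by omega)]
      rfl
    · rw [if_neg hpc, List.getD_eq_getElem?_getD, List.getElem?_set_ne (by omega),
        ← List.getD_eq_getElem?_getD, pvGetRow_nonneg hp]
  rw [pvGetCh, hrow]
  by_cases hpc : p = c.1
  · subst hpc
    rw [if_pos rfl]
    by_cases hqc : q = c.2
    · subst hqc
      rw [if_pos ⟨rfl, rfl⟩, pyGetD_nonneg' _ _ hq, List.getD_eq_getElem?_getD,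
        List.getElem?_set_self (by omega)]
      rfl
    · rw [if_neg (by simp [hqc]), pyGetD_nonneg' _ _ hq, List.getD_eq_getElem?_getD,
        List.getElem?_set_ne (by omega), pvGetCh, ← List.getD_eq_getElem?_getD,
        ← pyGetD_nonneg' _ _ hq]
  · rw [if_neg hpc, if_neg (by simp [hpc]), pvGetCh]
def pvOK (g : List (List Char)) (tc : List (Int × Int)) : Prop :=
  ∀ c ∈ tc, 0 ≤ c.1 ∧ 0 ≤ c.2 ∧ c.1 < (g.length : Int) ∧
    c.2 < ((pvGetRow g c.1).length : Int)

theorem pvOK_step {g : List (List Char)} {c : Int × Int} {tc : List (Int × Int)}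
    (htc : pvOK g (c :: tc)) : pvOK (pvStep g c) tc := by
  obtain ⟨b1, b2, b3, b4⟩ := htc c List.mem_cons_self
  intro c' hc'
  obtain ⟨a1, a2, a3, a4⟩ := htc c' (List.mem_cons_of_mem _ hc')
  exact ⟨a1, a2, by rw [length_pvStep]; exact a3,
    by rw [rowlen_pvStep b1 b2 a1]; exact a4⟩

theorem length_pvApply (g : List (List Char)) (tc : List (Int × Int)) :
    (pvApply g tc).length = g.length := by
  induction tc generalizing g with
  | nil => rfl
  | cons c rest ih => rw [pvApply_cons, ih, length_pvStep]

theorem rowlen_pvApply {g : List (List Char)} {tc : List (Int × Int)}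
    (htc : pvOK g tc) {y : Int} (hy : 0 ≤ y) :
    (pvGetRow (pvApply g tc) y).length = (pvGetRow g y).length := by
  induction tc generalizing g with
  | nil => rfl
  | cons c rest ih =>
    obtain ⟨b1, b2, b3, b4⟩ := htc c List.mem_cons_self
    rw [pvApply_cons, ih (pvOK_step htc), rowlen_pvStep b1 b2 hy]

theorem getCh_pvApply {g : List (List Char)} {tc : List (Int × Int)}
    (htc : pvOK g tc) {p q : Int} (hp : 0 ≤ p) (hq : 0 ≤ q) :
    pvGetCh (pvApply g tc) p q = if (p, q) ∈ tc then '.' else pvGetCh g p q := by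
  induction tc generalizing g with
  | nil => simp [pvApply]
  | cons c rest ih =>
    obtain ⟨b1, b2, b3, b4⟩ := htc c List.mem_cons_self
    rw [pvApply_cons, ih (pvOK_step htc), getCh_pvStep b1 b2 b3 b4 hp hq]
    by_cases h1 : (p, q) ∈ rest
    · simp [h1]
    · by_cases h2 : (p, q) = c
      · have : p = c.1 ∧ q = c.2 := by
          obtain ⟨x1, x2⟩ := c; simp only [Prod.mk.injEq] at h2; exact ⟨h2.1, h2.2⟩
        simp [this]
      · have : ¬(p = c.1 ∧ q = c.2) := by
          intro ⟨e1, e2⟩; exact h2 (by obtain ⟨x1, x2⟩ := c; simp_all)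
        simp [h1, h2, this]

theorem pvFMF0 {α β : Type} (l : List α) (P : α → Prop) [DecidablePred P] (f : α → β) :
    l.filterMap (fun x => if P x then some (f x) else none)
    = (l.filter (fun x => decide (P x))).map f := by
  induction l with
  | nil => rfl
  | cons a t ih => by_cases h : P a <;> simp [h, ih]

theorem pvPos_pvApply {g : List (List Char)} {tc : List (Int × Int)}
    (htc : pvOK g tc) :
    pvPos (pvApply g tc) = (pvPos g).filter (fun c => decide (c ∉ tc)) := by
  unfold pvPos
  rw [List.filter_flatMap, length_pvApply]
  apply List.flatMap_congr
  intro y hy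
  have hy1 : 1 ≤ y := (PySem.List.mem_pyRange_one.1 hy).1
  rw [rowlen_pvApply htc (by omega), pvFMF0, pvFMF0 _ (fun x => pvGetCh g y x = '@'),
    List.filter_map, List.filter_filter]
  congr 1
  apply List.filter_congr
  intro x hx
  have hx1 : 1 ≤ x := (PySem.List.mem_pyRange_one.1 hx).1
  rw [getCh_pvApply htc (by omega) (by omega)]
  by_cases hm : (y, x) ∈ tc <;> simp [hm, Function.comp]
theorem pvOK_scan {g : List (List Char)} : pvOK g (pvScan g) := by
  intro c hc
  rw [pvScan_eq] at hc
  have h1 := List.mem_filter.1 hc |>.1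
  obtain ⟨x1, x2⟩ := c
  have h2 := mem_pvPos.1 h1
  dsimp only at *
  exact ⟨by omega, by omega, by omega, by omega⟩

theorem mem_scan_iff {g : List (List Char)} {cells : List (Int × Int)}
    (hinv : cells.map pvShift = pvPos g) (hb : pvBorderOK g)
    {c : Int × Int} (hc : c ∈ cells) :
    (pvShift c ∈ pvScan g ↔ pvDeg cells c < 4) := by
  have hmem : pvShift c ∈ pvPos g := by rw [← hinv]; exact List.mem_map_of_mem hc
  rw [pvScan_eq, List.mem_filter]
  have : pvAdj g (pvShift c).1 (pvShift c).2 = pvDeg cells c + 1 := by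
    simpa [pvShift] using pvAdj_corr hinv hb hc
  simp [hmem, this]

theorem kept_inv {g : List (List Char)} {cells : List (Int × Int)}
    (hinv : cells.map pvShift = pvPos g) (hb : pvBorderOK g) :
    (pvKept cells).map pvShift = pvPos (pvApply g (pvScan g)) := by
  rw [pvPos_pvApply pvOK_scan, ← hinv, List.filter_map, pvKept]
  congr 1
  apply List.filter_congr
  intro c hc
  have := mem_scan_iff hinv hb hc
  by_cases h : pvDeg cells c < 4
  · simp_all [Function.comp]
  · simp_all [Function.comp]

theorem borderOK_apply {g : List (List Char)} (hb : pvBorderOK g) :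
    pvBorderOK (pvApply g (pvScan g)) := by
  intro y x hy hx hch
  rw [getCh_pvApply pvOK_scan hy hx] at hch
  split at hch
  · exact absurd hch (by decide)
  · have := hb y x hy hx hch
    rw [length_pvApply, rowlen_pvApply pvOK_scan hy]
    exact this

theorem scan_len {g : List (List Char)} {cells : List (Int × Int)}
    (hinv : cells.map pvShift = pvPos g) (hb : pvBorderOK g) :
    (pvKept cells).length + (pvScan g).length = cells.length := by
  have h1 : (pvScan g).length
      = (cells.filter (fun c => !(decide (4 ≤ pvDeg cells c)))).length := by
    rw [pvScan_eq, ← hinv, List.filter_map, List.length_map]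
    congr 1
    apply List.filter_congr
    intro c hc
    have hadj := pvAdj_corr hinv hb hc
    simp only [Function.comp_apply]
    dsimp only [pvShift]
    rw [← decide_not]
    exact decide_eq_decide.mpr (by constructor <;> intro <;> omega)
  rw [h1, pvKept]
  exact (List.length_eq_length_filter_add (fun c => decide (4 ≤ pvDeg cells c))).symm
theorem pvLoopB_shift (cells : List (Int × Int)) (t : Int) :
    pvLoopB t cells = t - cells.length + pvLoopB (cells.length) cells := by
  by_cases h : (pvKept cells).length = cells.length
  · conv_lhs => rw [pvLoopB]
    conv_rhs => rw [pvLoopB]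
    rw [if_pos h, if_pos h]; ring
  · conv_lhs => rw [pvLoopB]
    conv_rhs => rw [pvLoopB]
    rw [if_neg h, if_neg h,
      pvLoopB_shift (pvKept cells) t, pvLoopB_shift (pvKept cells) ((cells.length : Nat) : Int)]
    ring
termination_by cells.length
decreasing_by
  all_goals exact lt_of_le_of_ne (List.length_filter_le _ _) h

theorem loop_sim (fuel : Nat) :
    ∀ (g : List (List Char)) (cells : List (Int × Int)) (valid : Int),
    cells.map pvShift = pvPos g → pvBorderOK g → cells.length < fuel →
    pvLoopA fuel g valid = valid + pvLoopB (cells.length) cells := by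
  induction fuel with
  | zero => intro g cells valid _ _ hf; omega
  | succ n ih =>
    intro g cells valid hinv hb hf
    have hlen := scan_len hinv hb
    by_cases htc : pvScan g = []
    · have h0 : (pvScan g).length = 0 := by rw [htc]; rfl
      have hk : (pvKept cells).length = cells.length := by omega
      rw [show pvLoopA (n + 1) g valid
          = (if pvScan g = [] then valid
             else pvLoopA n (pvApply g (pvScan g)) (valid + (pvScan g).length)) from rfl,
        if_pos htc]
      conv_rhs => rw [pvLoopB]
      rw [if_pos hk]
      ring
    · have h1 : 1 ≤ (pvScan g).length := by
        cases hsc : pvScan g with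
        | nil => exact absurd hsc htc
        | cons a b => simp
      have hk : (pvKept cells).length ≠ cells.length := by omega
      have hrec := ih (pvApply g (pvScan g)) (pvKept cells) (valid + (pvScan g).length)
        (kept_inv hinv hb) (borderOK_apply hb) (by omega)
      rw [show pvLoopA (n + 1) g valid
          = (if pvScan g = [] then valid
             else pvLoopA n (pvApply g (pvScan g)) (valid + (pvScan g).length)) from rfl,
        if_neg htc, hrec]
      conv_rhs => rw [pvLoopB]
      rw [if_neg hk]
      conv_rhs => rw [pvLoopB_shift (pvKept cells) ((cells.length : Nat) : Int)]
      omega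
def pvG0 (input : List String) : List (List Char) :=
  List.replicate ((input.map (fun l => '.' :: l.toList ++ ['.'])).headD []).length '.' ::
    input.map (fun l => '.' :: l.toList ++ ['.']) ++
    [List.replicate ((input.map (fun l => '.' :: l.toList ++ ['.'])).headD []).length '.']

theorem part_2_eq (input : List String) :
    part_2 input = pvLoopA ((pvG0 input).foldl (fun n r => n + r.length) 0 + 1) (pvG0 input) 0 :=
  rfl

theorem pvG0_length (input : List String) : (pvG0 input).length = input.length + 2 := by
  simp [pvG0]

theorem pvG0_row {input : List String} {k : Nat} (hk : k < input.length) :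
    pvGetRow (pvG0 input) ((k : Int) + 1) = '.' :: input[k].toList ++ ['.'] := by
  rw [show ((k : Int) + 1) = (((k + 1 : Nat) : Nat) : Int) by push_cast; ring,
    pvGetRow_nonneg (by positivity)]
  simp only [Int.toNat_natCast, pvG0, List.getD_eq_getElem?_getD]
  rw [List.getElem?_append_left (by simp; omega), List.getElem?_cons_succ]
  simp [List.getElem?_map, List.getElem?_eq_getElem hk]

theorem pvG0_ch {input : List String} {k j : Nat} (hk : k < input.length)
    (hj : j < input[k].toList.length) :
    pvGetCh (pvG0 input) ((k : Int) + 1) ((j : Int) + 1) = input[k].toList[j] := by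
  rw [pvGetCh, pvG0_row hk, pyGetD_nonneg' _ _ (by positivity),
    show ((j : Int) + 1).toNat = j + 1 by omega, List.getD_eq_getElem?_getD,
    List.getElem?_append_left (by simpa using hj), List.getElem?_cons_succ,
    List.getElem?_eq_getElem hj]
  rfl

theorem pvG0_row_border {input : List String} {n : Nat}
    (h : n = 0 ∨ n = input.length + 1) :
    (pvG0 input).getD n [] =
      List.replicate ((input.map (fun l => '.' :: l.toList ++ ['.'])).headD []).length '.' := by
  rcases h with rfl | rfl
  · rw [pvG0, List.getD_eq_getElem?_getD,
      List.getElem?_append_left (by simp), List.getElem?_cons_zero]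
    rfl
  · rw [pvG0, List.getD_eq_getElem?_getD,
      show input.length + 1 = (List.replicate ((input.map (fun l => '.' :: l.toList ++ ['.'])).headD []).length '.' ::
        input.map (fun l => '.' :: l.toList ++ ['.'])).length by simp,
      List.getElem?_append_right (by omega)]
    simp

theorem borderOK_G0 (input : List String) : pvBorderOK (pvG0 input) := by
  intro y x hy hx hch
  rw [pvGetCh, pvGetRow_nonneg hy] at hch
  have hdot : ∀ (w : Nat), PySem.List.pyGetD (List.replicate w '.') x '.' = '.' := by
    intro w
    rw [pyGetD_nonneg' _ _ hx, List.getD_eq_getElem?_getD]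
    rcases Nat.lt_or_ge x.toNat w with h | h
    · rw [List.getElem?_eq_getElem (by simpa using h)]
      simp
    · rw [List.getElem?_eq_none (by simpa using h)]
      rfl
  rcases Nat.lt_or_ge y.toNat (input.length + 2) with hyH | hyH
  · rcases Nat.eq_zero_or_pos y.toNat with h0 | h0
    · rw [pvG0_row_border (Or.inl h0)] at hch
      rw [hdot] at hch
      exact absurd hch (by decide)
    · rcases Nat.lt_or_ge y.toNat (input.length + 1) with hyH2 | hyH2
      · -- interior row: y.toNat = k + 1 with k < input.length
        obtain ⟨k, hk1⟩ : ∃ k, y.toNat = k + 1 := ⟨y.toNat - 1, by omega⟩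
        have hk : k < input.length := by omega
        have hrow : (pvG0 input).getD (k + 1) [] = '.' :: input[k].toList ++ ['.'] := by
          have := pvG0_row (input := input) hk
          rwa [pvGetRow_nonneg (by positivity), show ((k : Int) + 1).toNat = k + 1 by omega] at this
        rw [hk1, hrow, pyGetD_nonneg' _ _ hx, List.getD_eq_getElem?_getD] at hch
        set chars := input[k].toList with hchars
        rcases Nat.eq_zero_or_pos x.toNat with hx0 | hx0
        · rw [hx0, List.getElem?_append_left (by simp), List.getElem?_cons_zero] at hch
          exact absurd hch (by simp)
        · rcases Nat.lt_or_ge x.toNat (chars.length + 1) with hxlt | hxge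
          · -- interior column
            have hrowlen : (pvGetRow (pvG0 input) y).length = chars.length + 2 := by
              rw [pvGetRow_nonneg hy, hk1, hrow]
              simp
            rw [pvG0_length, hrowlen]
            omega
          · rcases Nat.lt_or_ge x.toNat (chars.length + 2) with hxe | hxe
            · have : x.toNat = ('.' :: chars).length := by simp; omega
              rw [this, List.getElem?_append_right (by omega)] at hch
              simp at hch
            · rw [List.getElem?_eq_none (by simp; omega)] at hch
              exact absurd hch (by decide)
      · -- y.toNat = input.length + 1 : bottom border
        have : y.toNat = input.length + 1 := by omega
        rw [pvG0_row_border (Or.inr this)] at hch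
        rw [hdot] at hch
        exact absurd hch (by decide)
  · -- out of range row
    rw [List.getD_eq_getElem?_getD, List.getElem?_eq_none (by rw [pvG0_length]; omega)] at hch
    rw [show (none : Option (List Char)).getD [] = [] from rfl] at hch
    rw [pyGetD_nonneg' _ _ hx] at hch
    simp at hch
def pvCanon (input : List String) : List (Int × Int) :=
  (List.range input.length).flatMap (fun k =>
    (List.range (input.getD k "").toList.length).filterMap (fun j =>
      if (input.getD k "").toList.getD j '.' = '@' then some ((k : Int) + 1, (j : Int) + 1)
      else none))

theorem pvPos_G0 (input : List String) : pvPos (pvG0 input) = pvCanon input := by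
  unfold pvPos pvCanon
  rw [pvG0_length,
    show ((input.length + 2 : Nat) : Int) - 1 = 1 + ((input.length : Nat) : Int) by push_cast; ring,
    PySem.List.pyRange_one 1,
    show ((1 : Int) + (input.length : Int) - 1).toNat = input.length by omega,
    List.flatMap_map]
  apply List.flatMap_congr
  intro k hk
  have hk' : k < input.length := List.mem_range.1 hk
  rw [show (1 : Int) + (k : Int) = (k : Int) + 1 by ring, pvG0_row hk']
  have hg : input.getD k "" = input[k] := by
    rw [List.getD_eq_getElem?_getD, List.getElem?_eq_getElem hk']
    rfl
  rw [hg,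
    show ((('.' :: input[k].toList ++ ['.']).length : Int) - 1 : Int)
      = 1 + (input[k].toList.length : Int) by simp; ring,
    PySem.List.pyRange_one 1,
    show ((1 : Int) + (input[k].toList.length : Int) - 1).toNat = input[k].toList.length by omega,
    List.filterMap_map]
  apply List.filterMap_congr
  intro j hj
  have hj' : j < input[k].toList.length := List.mem_range.1 hj
  simp only [Function.comp_apply]
  rw [show (1 : Int) + (j : Int) = (j : Int) + 1 by ring, pvG0_ch hk' hj',
    List.getD_eq_getElem?_getD, List.getElem?_eq_getElem hj']
  rfl
def pvCanon0 (input : List String) : List (Int × Int) :=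
  (List.range input.length).flatMap (fun k =>
    (List.range (input.getD k "").toList.length).filterMap (fun j =>
      if (input.getD k "").toList.getD j '.' = '@' then some ((k : Int), (j : Int))
      else none))

theorem pvE_eq (input : List String) :
    ((PySem.List.enumerate input).flatMap (fun p =>
      (PySem.List.enumerate p.2.toList).filterMap (fun q =>
        if q.2 = '@' then some (p.1, q.1) else none)))
    = pvCanon0 input := by
  unfold pvCanon0
  rw [PySem.List.enumerate_eq_map_pyRange input "", PySem.List.len_eq,
    PySem.List.pyRange_zero_natCast, List.flatMap_map, List.flatMap_map]
  apply List.flatMap_congr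
  intro k hk
  have hp2 : PySem.List.pyGetD input ((k : Nat) : Int) "" = input.getD k "" := by
    simp [PySem.List.pyGetD_natCast]
  simp only [hp2]
  rw [PySem.List.enumerate_eq_map_pyRange _ '.', PySem.List.len_eq,
    PySem.List.pyRange_zero_natCast, List.filterMap_map, List.filterMap_map]
  apply List.filterMap_congr
  intro j hj
  simp only [Function.comp_apply]
  rw [show PySem.List.pyGetD (input.getD k "").toList ((j : Nat) : Int) '.'
      = (input.getD k "").toList.getD j '.' by simp [PySem.List.pyGetD_natCast]]

theorem nodup_pvCanon0 (input : List String) : (pvCanon0 input).Nodup := by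
  apply List.nodup_flatMap.2
  refine ⟨?_, ?_⟩
  · intro k _
    apply List.Nodup.filterMap ?_ List.nodup_range
    intro a a' b hb hb'
    split at hb
    · split at hb'
      · simp only [Option.mem_def, Option.some.injEq] at hb hb'
        rw [← hb] at hb'
        have := (Prod.mk.injEq _ _ _ _ ▸ hb' : (k : Int) = (k : Int) ∧ ((a' : Int)) = ((a : Int)))
        omega
      · simp at hb'
    · simp at hb
  · apply List.Pairwise.imp ?_ List.pairwise_lt_range
    intro k k' hkk
    rw [Function.onFun, List.disjoint_left]
    intro x hx hx'
    obtain ⟨a, _, ha⟩ := List.mem_filterMap.1 hx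
    obtain ⟨a', _, ha'⟩ := List.mem_filterMap.1 hx'
    split at ha
    · split at ha'
      · have e1 : x.1 = (k : Int) := by rw [← Option.some_inj.1 ha]
        have e2 : x.1 = (k' : Int) := by rw [← Option.some_inj.1 ha']
        omega
      · simp at ha'
    · simp at ha

theorem cells0_map (input : List String) :
    (pvCells0 input).map pvShift = pvCanon input := by
  rw [pvCells0, pvE_eq, PySem.Set.ofList_eq_self_of_nodup _ (nodup_pvCanon0 input)]
  unfold pvCanon0 pvCanon
  rw [List.map_flatMap]
  apply List.flatMap_congr
  intro k _
  rw [List.map_filterMap]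
  apply List.filterMap_congr
  intro j _
  split
  · rfl
  · rfl
theorem pv_foldsum (l : List (List Char)) (a : Nat) :
    l.foldl (fun n r => n + r.length) a = a + (l.map List.length).sum := by
  induction l generalizing a with
  | nil => simp
  | cons r t ih => simp [ih]; omega

theorem fuel_ok (input : List String) :
    (pvCells0 input).length < (pvG0 input).foldl (fun n r => n + r.length) 0 + 1 := by
  have h1 : (pvCells0 input).length = (pvCanon input).length := by
    rw [← cells0_map input, List.length_map]
  have h2 : (pvCanon input).length ≤ (input.map (fun s => s.toList.length)).sum := by
    rw [pvCanon, List.length_flatMap]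
    have h3 : (List.range input.length).map
        (fun k => (input.getD k "").toList.length) = input.map (fun s => s.toList.length) := by
      apply List.ext_getElem
      · simp
      · intro i h1 h2
        simp [List.getD_eq_getElem?_getD, List.getElem?_eq_getElem (by simpa using h1)]
    calc ((List.range input.length).map (fun k =>
            ((List.range (input.getD k "").toList.length).filterMap (fun j =>
              if (input.getD k "").toList.getD j '.' = '@' then some ((k : Int) + 1, (j : Int) + 1)
              else none)).length)).sum
        ≤ ((List.range input.length).map (fun k => (input.getD k "").toList.length)).sum := by
          apply List.sum_le_sum
          intro k _
          calc ((List.range (input.getD k "").toList.length).filterMap _).length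
              ≤ (List.range (input.getD k "").toList.length).length :=
                List.length_filterMap_le _ _
            _ = (input.getD k "").toList.length := List.length_range
      _ = _ := by rw [h3]
  have h4 : (input.map (fun s => s.toList.length)).sum
      ≤ ((pvG0 input).map List.length).sum := by
    rw [pvG0]
    simp only [List.map_append, List.map_cons, List.map_map, List.sum_append, List.sum_cons]
    have : (input.map (List.length ∘ fun l => '.' :: l.toList ++ ['.'])).sum
        = (input.map (fun s => s.toList.length + 2)).sum := by
      congr 1
      apply List.map_congr_left
      intro s _
      simp [Function.comp]
    rw [this]
    have h5 : (input.map (fun s => s.toList.length)).sum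
        ≤ (input.map (fun s => s.toList.length + 2)).sum := by
      apply List.sum_le_sum
      intro s _
      omega
    omega
  rw [pv_foldsum]
  omega

theorem part_2_eq_loopB (input : List String) :
    part_2 input = pvLoopB ((pvCells0 input).length) (pvCells0 input) := by
  rw [part_2_eq, loop_sim _ _ (pvCells0 input) 0
    (by rw [cells0_map, pvPos_G0]) (borderOK_G0 input) (fuel_ok input)]
  ring

-- ===== the 4-core: both processes compute the unique maximal stable subset =====

-- the fixpoint A's simultaneous refilter converges to
def pvCore (cells : List (Int × Int)) : List (Int × Int) :=
  if (pvKept cells).length = cells.length then cells else pvCore (pvKept cells)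
termination_by cells.length
decreasing_by
  exact lt_of_le_of_ne (List.length_filter_le _ _) (by assumption)

theorem loopB_eq_core (total : Int) (cells : List (Int × Int)) :
    pvLoopB total cells = total - ((pvCore cells).length : Int) := by
  by_cases h : (pvKept cells).length = cells.length
  · conv_lhs => rw [pvLoopB]
    conv_rhs => rw [pvCore]
    rw [if_pos h, if_pos h]
  · conv_lhs => rw [pvLoopB]
    conv_rhs => rw [pvCore]
    rw [if_neg h, if_neg h, loopB_eq_core total (pvKept cells)]
termination_by cells.length
decreasing_by
  exact lt_of_le_of_ne (List.length_filter_le _ _) h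

theorem pvDeg_mono {S T : List (Int × Int)} (h : ∀ x ∈ S, x ∈ T) (c : Int × Int) :
    pvDeg S c ≤ pvDeg T c := by
  unfold pvDeg
  apply List.sum_le_sum
  intro o _
  by_cases hm : (c.1 + o.1, c.2 + o.2) ∈ S
  · simp [hm, h _ hm]
  · split_ifs <;> simp

theorem core_props (cells : List (Int × Int)) :
    (pvCore cells).Sublist cells ∧
    (∀ d ∈ pvCore cells, 4 ≤ pvDeg (pvCore cells) d) ∧
    (∀ S : List (Int × Int), (∀ x ∈ S, x ∈ cells) → (∀ d ∈ S, 4 ≤ pvDeg S d) →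
      ∀ x ∈ S, x ∈ pvCore cells) := by
  by_cases h : (pvKept cells).length = cells.length
  · have hfix : pvKept cells = cells := List.Sublist.eq_of_length List.filter_sublist h
    have hall : ∀ c ∈ cells, 4 ≤ pvDeg cells c := by
      intro c hc
      have := (List.filter_eq_self.1 hfix) c hc
      simpa using this
    rw [pvCore, if_pos h]
    exact ⟨List.Sublist.refl _, hall, fun S hS _ x hx => hS x hx⟩
  · obtain ⟨ih1, ih2, ih3⟩ := core_props (pvKept cells)
    rw [pvCore, if_neg h]
    refine ⟨ih1.trans List.filter_sublist, ih2, ?_⟩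
    intro S hS hstab x hx
    refine ih3 S ?_ hstab x hx
    intro z hz
    refine List.mem_filter.2 ⟨hS z hz, ?_⟩
    have := le_trans (hstab z hz) (pvDeg_mono hS z)
    simpa using this
termination_by cells.length
decreasing_by
  exact lt_of_le_of_ne (List.length_filter_le _ _) h

-- ===== worklist peeling reaches the same maximal stable subset =====

theorem mem_discard {live : List (Int × Int)} {c x : Int × Int} :
    x ∈ PySem.Set.discard live c ↔ x ∈ live ∧ x ≠ c := by
  simp [PySem.Set.discard, List.mem_filter]

theorem discard_sublist (live : List (Int × Int)) (c : Int × Int) :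
    (PySem.Set.discard live c).Sublist live := by
  simp only [PySem.Set.discard]
  exact List.filter_sublist

theorem length_discard_lt {live : List (Int × Int)} {c : Int × Int} (h : c ∈ live) :
    (PySem.Set.discard live c).length < live.length := by
  simp only [PySem.Set.discard]
  apply List.length_filter_lt_length_iff_exists.2
  exact ⟨c, h, by simp⟩

theorem offs_neg {o : Int × Int} (h : o ∈ pvOffs) : (-o.1, -o.2) ∈ pvOffs := by
  fin_cases h <;> decide

theorem pvDeg_discard_of_no_edge {live : List (Int × Int)} {c d : Int × Int}
    (h : ∀ o ∈ pvOffs, (d.1 + o.1, d.2 + o.2) ≠ c) :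
    pvDeg (PySem.Set.discard live c) d = pvDeg live d := by
  unfold pvDeg
  congr 1
  apply List.map_congr_left
  intro o ho
  have hne := h o ho
  by_cases hm : (d.1 + o.1, d.2 + o.2) ∈ live
  · simp [hm, hne]
  · simp [hm]

theorem nbrsIn_len (live : List (Int × Int)) (c : Int × Int) :
    (pvNbrsIn live c).length ≤ 8 :=
  le_trans (List.length_filterMap_le _ _) (by decide)

theorem mem_nbrsIn_of {live : List (Int × Int)} {c : Int × Int} {o : Int × Int}
    (ho : o ∈ pvOffs) (h : (c.1 + o.1, c.2 + o.2) ∈ live) :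
    (c.1 + o.1, c.2 + o.2) ∈ pvNbrsIn live c :=
  List.mem_filterMap.2 ⟨o, ho, by simp [h]⟩

theorem peel_main : ∀ (fuel : Nat) (live queue : List (Int × Int)),
    (∀ d ∈ live, pvDeg live d < 4 → d ∈ queue) →
    9 * live.length + queue.length < fuel →
    (pvPeel fuel live queue).Sublist live ∧
    (∀ d ∈ pvPeel fuel live queue, 4 ≤ pvDeg (pvPeel fuel live queue) d) ∧
    (∀ S : List (Int × Int), (∀ x ∈ S, x ∈ live) → (∀ d ∈ S, 4 ≤ pvDeg S d) →
      ∀ x ∈ S, x ∈ pvPeel fuel live queue) := by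
  intro fuel
  induction fuel with
  | zero => intro live queue _ hf; omega
  | succ n ih =>
    intro live queue hcomp hf
    match queue with
    | [] =>
      rw [show pvPeel (n + 1) live [] = live from rfl]
      refine ⟨List.Sublist.refl _, ?_, fun S hS _ x hx => hS x hx⟩
      intro d hd
      by_contra hlt
      exact absurd (hcomp d hd (by omega)) (List.not_mem_nil)
    | c :: queue =>
      by_cases hcl : c ∈ live
      · by_cases hdeg : pvDeg live c < 4
        · -- remove c, re-enqueue its live neighbours
          rw [show pvPeel (n + 1) live (c :: queue)
              = pvPeel n (PySem.Set.discard live c)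
                  ((pvNbrsIn (PySem.Set.discard live c) c).reverse ++ queue)
              from by rw [pvPeel]; rw [if_pos hcl, if_pos hdeg]]
          set live' := PySem.Set.discard live c with hl'
          set queue' := (pvNbrsIn live' c).reverse ++ queue with hq'
          have hcomp' : ∀ d ∈ live', pvDeg live' d < 4 → d ∈ queue' := by
            intro d hd hd4
            obtain ⟨hdl, hdc⟩ := mem_discard.1 hd
            by_cases hold : pvDeg live d < 4
            · have := hcomp d hdl hold
              rcases List.mem_cons.1 this with h | h
              · exact absurd h hdc
              · exact List.mem_append_right _ h
            · -- d's degree dropped: c must be a neighbour of d, so d is re-enqueued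
              have hedge : ∃ o ∈ pvOffs, (d.1 + o.1, d.2 + o.2) = c := by
                by_contra hno
                have hno' : ∀ o ∈ pvOffs, (d.1 + o.1, d.2 + o.2) ≠ c :=
                  fun o ho he => hno ⟨o, ho, he⟩
                rw [pvDeg_discard_of_no_edge hno'] at hd4
                omega
              obtain ⟨o, ho, hoc⟩ := hedge
              have ho' : (-o.1, -o.2) ∈ pvOffs := offs_neg ho
              have hdc' : (c.1 + -o.1, c.2 + -o.2) = d := by
                have h1 : d.1 + o.1 = c.1 := congrArg Prod.fst hoc
                have h2 : d.2 + o.2 = c.2 := congrArg Prod.snd hoc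
                obtain ⟨d1, d2⟩ := d
                simp only [Prod.mk.injEq]
                constructor <;> simp_all <;> omega
              have := mem_nbrsIn_of (live := live') ho' (by rw [hdc']; exact hd)
              rw [hdc'] at this
              exact List.mem_append_left _ (List.mem_reverse.2 this)
          have hfuel' : 9 * live'.length + queue'.length < n := by
            have hl1 : live'.length < live.length := length_discard_lt hcl
            have hq1 : queue'.length ≤ 8 + queue.length := by
              rw [hq', List.length_append, List.length_reverse]
              have := nbrsIn_len live' c
              omega
            simp only [List.length_cons] at hf
            omega
          obtain ⟨r1, r2, r3⟩ := ih live' queue' hcomp' hfuel'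
          refine ⟨r1.trans (discard_sublist live c), r2, ?_⟩
          intro S hS hstab x hx
          refine r3 S ?_ hstab x hx
          intro z hz
          refine mem_discard.2 ⟨hS z hz, ?_⟩
          intro hzc
          have h4 := hstab z hz
          have := pvDeg_mono hS z
          rw [hzc] at h4 this
          omega
        · -- c keeps degree ≥ 4: just drop it from the queue
          rw [show pvPeel (n + 1) live (c :: queue) = pvPeel n live queue
              from by rw [pvPeel]; rw [if_pos hcl, if_neg hdeg]]
          refine ih live queue ?_ (by simp only [List.length_cons] at hf; omega)
          intro d hd hd4
          rcases List.mem_cons.1 (hcomp d hd hd4) with h | h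
          · exact absurd (h ▸ hd4) (by omega)
          · exact h
      · -- c was already removed
        rw [show pvPeel (n + 1) live (c :: queue) = pvPeel n live queue
            from by rw [pvPeel]; rw [if_neg hcl]]
        refine ih live queue ?_ (by simp only [List.length_cons] at hf; omega)
        intro d hd hd4
        rcases List.mem_cons.1 (hcomp d hd hd4) with h | h
        · exact absurd (h ▸ hd) hcl
        · exact h

theorem length_eq_of_nodup {l1 l2 : List (Int × Int)} (h1 : l1.Nodup) (h2 : l2.Nodup)
    (s1 : ∀ x ∈ l1, x ∈ l2) (s2 : ∀ x ∈ l2, x ∈ l1) : l1.length = l2.length := by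
  rw [← List.toFinset_card_of_nodup h1, ← List.toFinset_card_of_nodup h2]
  congr 1
  ext x
  simp only [List.mem_toFinset]
  exact ⟨s1 x, s2 x⟩

-- ===== VERDICT (by name: the statement is the Claim_ definition above) =====
theorem part_2_spec : Claim_equal_part_2 := by
  intro input _ _
  unfold Spec_part_2
  have hnd : (pvCells0 input).Nodup := by
    rw [pvCells0]
    exact PySem.Set.nodup_ofList _
  obtain ⟨csub, cstab, cmax⟩ := core_props (pvCells0 input)
  obtain ⟨psub, pstab, pmax⟩ := peel_main (10 * (pvCells0 input).length + 1)
    (pvCells0 input) (pvCells0 input).reverse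
    (fun d hd _ => List.mem_reverse.2 hd)
    (by rw [List.length_reverse]; omega)
  have hlen : (pvCore (pvCells0 input)).length
      = (pvPeel (10 * (pvCells0 input).length + 1) (pvCells0 input)
          (pvCells0 input).reverse).length := by
    refine length_eq_of_nodup (csub.nodup hnd) (psub.nodup hnd) ?_ ?_
    · exact fun x hx => pmax _ csub.subset cstab x hx
    · exact fun x hx => cmax _ psub.subset pstab x hx
  rw [part_2_eq_loopB, loopB_eq_core]
  show _ = (((pvCells0 input).length : Int)
      - ((pvPeel (10 * (pvCells0 input).length + 1) (pvCells0 input)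
          (pvCells0 input).reverse).length : Int))
  rw [← hlen]
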